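-- pv_equiv track=rewrite | github.com/jackson1488/students | backend/app/utils/seed_pcs_demo.py | _normalize_group_prefix
-- ===== SOURCE A (Python) =====
-- def _normalize_group_prefix(group_name: str) -> str:
--     raw = str(group_name or "").strip().lower()
--     cleaned = []
--     prev_dash = False
--
--     for ch in raw:
--         if ch.isalnum():
--             cleaned.append(ch)
--             prev_dash = False
--         elif ch in {"-", "_"}:
--             cleaned.append(ch)
--             prev_dash = False
--         elif ch in {" ", "/", "\\"}:
--             if not prev_dash:
--                 cleaned.append("-")
--                 prev_dash = True
--
--     prefix = "".join(cleaned).strip("-_")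
--     return prefix or "group"
-- ===== SOURCE B (Python) =====
-- def _normalize_group_prefix(group_name: str) -> str:
--     raw = str(group_name or "").strip().lower()
--     # pass 1: keep word chars and separators, mapping every separator to a space
--     kept = "".join(
--         (" " if c in " /\\" else c)
--         for c in raw
--         if c.isalnum() or c in "-_ /\\"
--     )
--     # pass 2: str.split() collapses separator runs; boundary runs vanish,
--     # which str.strip("-_") would have removed anyway
--     collapsed = "-".join(kept.split())
--     return collapsed.strip("-_") or "group"
-- ===== Notes on version B (the rewrite author's own statement) =====
-- stated objective: idiomatic
-- what changed: Replaces the stateful char-by-char loop with a prev_dash flag by two stateless passes: a filter/map comprehension that keeps word chars and maps every separator to a space, then a split/join pass that collapses separator runs.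
import Mathlib
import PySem

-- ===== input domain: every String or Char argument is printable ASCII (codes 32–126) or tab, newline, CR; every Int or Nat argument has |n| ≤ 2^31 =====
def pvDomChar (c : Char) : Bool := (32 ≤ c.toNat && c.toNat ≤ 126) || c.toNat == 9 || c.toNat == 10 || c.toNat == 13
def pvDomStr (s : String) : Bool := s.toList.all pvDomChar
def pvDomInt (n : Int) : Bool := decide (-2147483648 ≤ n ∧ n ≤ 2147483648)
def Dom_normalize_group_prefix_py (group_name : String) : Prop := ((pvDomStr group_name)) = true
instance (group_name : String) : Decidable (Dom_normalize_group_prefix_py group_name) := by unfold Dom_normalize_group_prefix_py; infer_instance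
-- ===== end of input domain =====

-- B replaces A's stateful prev_dash loop by a stateless filter/map pass plus a
-- split/join collapse of separator runs (different decomposition, same cost).

-- ===== PORT A =====
-- the loop body of A: state = (cleaned, prev_dash)
def pvStepA (st : List Char × Bool) (ch : Char) : List Char × Bool :=
  if PySem.Chars.isalnum ch then (st.1 ++ [ch], false)
  else if ch = '-' ∨ ch = '_' then (st.1 ++ [ch], false)
  else if ch = ' ' ∨ ch = '/' ∨ ch = '\\' then
    (if st.2 then st else (st.1 ++ ['-'], true))
  else st

def normalize_group_prefix_py (group_name : String) : String :=
  let raw := PySem.Chars.lower (PySem.Chars.strip group_name.toList)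
  let res := raw.foldl pvStepA ([], false)
  let pfx := PySem.Chars.stripChars res.1 ['-', '_']
  if pfx = [] then "group" else String.ofList pfx

-- ===== PORT B =====
-- the generator of Source B: keep word chars and separators, map separators to ' '
def pvKeepB (c : Char) : Option Char :=
  if PySem.Chars.isalnum c ∨ c = '-' ∨ c = '_' ∨ c = ' ' ∨ c = '/' ∨ c = '\\' then
    some (if c = ' ' ∨ c = '/' ∨ c = '\\' then ' ' else c)
  else none

def normalize_group_prefix_py_alt (group_name : String) : String :=
  let raw := PySem.Chars.lower (PySem.Chars.strip group_name.toList)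
  let kept := raw.filterMap pvKeepB
  let collapsed := PySem.Chars.join ['-'] (PySem.Chars.split₀ kept)
  let out := PySem.Chars.stripChars collapsed ['-', '_']
  if out = [] then "group" else String.ofList out

-- ===== PRECONDITION & SPEC =====
def Spec_normalize_group_prefix_py (group_name : String) (out : String) : Prop := out = normalize_group_prefix_py_alt group_name
instance (group_name : String) (out : String) : Decidable (Spec_normalize_group_prefix_py group_name out) := by unfold Spec_normalize_group_prefix_py; infer_instance

-- ===== CLAIM (what is proved, stated in full; the proofs are below) =====
def Claim_equal_normalize_group_prefix_py : Prop := ∀ (group_name : String), Dom_normalize_group_prefix_py group_name → Spec_normalize_group_prefix_py group_name (normalize_group_prefix_py group_name)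

-- ===== LEMMAS AND PROOFS =====

-- chars that appear in `kept`: a space, or a "solid" (appended-verbatim) char
def pvSolid (c : Char) : Bool := PySem.Chars.isalnum c || c = '-' || c = '_'
def pvOk (c : Char) : Prop := c = ' ' ∨ (pvSolid c = true ∧ PySem.Chars.isspace c = false)

-- A's loop output and final prev_dash on the filtered list, in recursive form
def pvBody : List Char → Bool → List Char
  | [], _ => []
  | c :: t, pd => if c = ' ' then (if pd then pvBody t true else '-' :: pvBody t true) else c :: pvBody t false

def pvPd : List Char → Bool → Bool
  | [], pd => pd
  | c :: t, _ => if c = ' ' then pvPd t true else pvPd t false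

-- split₀.go on space/solid chars, without the acc accumulator
def pvGoSpec : List Char → List Char → List (List Char)
  | [], cur => if cur.isEmpty then [] else [cur.reverse]
  | c :: t, cur => if c = ' ' then (if cur.isEmpty then pvGoSpec t [] else cur.reverse :: pvGoSpec t []) else pvGoSpec t (c :: cur)

theorem alnum_not_space (c : Char) (h : PySem.Chars.isalnum c = true) : PySem.Chars.isspace c = false := by
  have hA : ('A'.val.toNat) = 65 := by decide
  have hZ : ('Z'.val.toNat) = 90 := by decide
  have ha : ('a'.val.toNat) = 97 := by decide
  have hz : ('z'.val.toNat) = 122 := by decide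
  have h0 : ('0'.val.toNat) = 48 := by decide
  have h9 : ('9'.val.toNat) = 57 := by decide
  simp only [PySem.Chars.isalnum, PySem.Chars.isalpha, PySem.Chars.isdigit,
        PySem.Chars.isupper, PySem.Chars.islower, Char.le_def, UInt32.le_iff_toNat_le,
        hA, hZ, ha, hz, h0, h9, Bool.or_eq_true, Bool.and_eq_true, decide_eq_true_eq] at h
  simp only [PySem.Chars.isspace, Char.toNat, Bool.or_eq_false_iff, Bool.and_eq_false_iff, decide_eq_false_iff_not]
  omega

theorem pvOk_of_mem (raw : List Char) {c : Char} (h : c ∈ raw.filterMap pvKeepB) : pvOk c := by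
  rw [List.mem_filterMap] at h
  obtain ⟨x, _, hx⟩ := h
  unfold pvKeepB at hx
  split at hx
  · rename_i hcond
    split at hx
    · exact Or.inl (Option.some.inj hx).symm
    · rename_i hnsep
      right
      have hcx : x = c := Option.some.inj hx
      subst hcx
      rcases hcond with h1 | h1 | h1 | h1 | h1 | h1
      · exact ⟨by simp [pvSolid, h1], alnum_not_space x h1⟩
      · subst h1; exact ⟨by decide, by decide⟩
      · subst h1; exact ⟨by decide, by decide⟩
      · exact absurd (Or.inl h1) hnsep
      · exact absurd (Or.inr (Or.inl h1)) hnsep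
      · exact absurd (Or.inr (Or.inr h1)) hnsep
  · simp at hx

-- Lemma 1: A's loop ignores dropped chars and treats every separator as ' '
theorem foldl_filterMap (raw : List Char) : ∀ st : List Char × Bool,
    raw.foldl pvStepA st = (raw.filterMap pvKeepB).foldl pvStepA st := by
  induction raw with
  | nil => intro st; rfl
  | cons c t ih =>
    intro st
    simp only [List.foldl_cons, List.filterMap_cons]
    by_cases ha : PySem.Chars.isalnum c = true
    · have h1 : pvKeepB c = some c := by
        unfold pvKeepB
        have hs : ¬ (c = ' ' ∨ c = '/' ∨ c = '\\') := by
          rintro (rfl | rfl | rfl) <;> exact absurd ha (by decide)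
        simp [ha, hs]
      rw [h1]; simp only [List.foldl_cons]; exact ih _
    · by_cases hd : c = '-' ∨ c = '_'
      · have h1 : pvKeepB c = some c := by
          unfold pvKeepB
          have hs : ¬ (c = ' ' ∨ c = '/' ∨ c = '\\') := by
            rcases hd with rfl | rfl <;> decide
          simp [hd, hs]
        rw [h1]; simp only [List.foldl_cons]; exact ih _
      · by_cases hsep : c = ' ' ∨ c = '/' ∨ c = '\\'
        · have h1 : pvKeepB c = some ' ' := by unfold pvKeepB; simp [hsep]
          have h2 : pvStepA st c = pvStepA st ' ' := by
            obtain ⟨l, b⟩ := st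
            rcases hsep with rfl | rfl | rfl <;> cases b <;>
              simp [pvStepA, show PySem.Chars.isalnum ' ' = false from by decide,
                    show PySem.Chars.isalnum '/' = false from by decide,
                    show PySem.Chars.isalnum '\\' = false from by decide]
          rw [h1, h2]; simp only [List.foldl_cons]; exact ih _
        · have h1 : pvKeepB c = none := by unfold pvKeepB; simp [ha, hd, hsep]
          have h2 : pvStepA st c = st := by unfold pvStepA; simp [ha, hd, hsep]
          rw [h1, h2]; exact ih _

-- Lemma 2: closed form of A's loop on the filtered list
theorem foldl_body (k : List Char) (hk : ∀ c ∈ k, pvOk c) :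
    ∀ acc pd, k.foldl pvStepA (acc, pd) = (acc ++ pvBody k pd, pvPd k pd) := by
  induction k with
  | nil => intro acc pd; simp [pvBody, pvPd]
  | cons c t ih =>
    intro acc pd
    have hc := hk c (by simp)
    have ht : ∀ c ∈ t, pvOk c := fun c hc => hk c (by simp [hc])
    simp only [List.foldl_cons]
    rcases hc with rfl | ⟨hs, _⟩
    · have hstep : pvStepA (acc, pd) ' ' = if pd then (acc, pd) else (acc ++ ['-'], true) := by
        unfold pvStepA
        rw [if_neg (by decide), if_neg (by decide), if_pos (by decide)]
      rw [hstep]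
      by_cases hpd : pd
      · subst hpd; rw [if_pos rfl, ih ht]; simp [pvBody, pvPd]
      · simp only [Bool.not_eq_true] at hpd; subst hpd
        rw [if_neg (by simp), ih ht]
        simp [pvBody, pvPd]
    · have hne : c ≠ ' ' := by
        rintro rfl; exact absurd hs (by decide)
      have hstep : pvStepA (acc, pd) c = (acc ++ [c], false) := by
        unfold pvStepA
        simp only [pvSolid, Bool.or_eq_true, decide_eq_true_eq] at hs
        rcases hs with (h | h) | h
        · rw [if_pos h]
        · subst h; rw [if_neg (by decide), if_pos (by decide)]
        · subst h; rw [if_neg (by decide), if_pos (by decide)]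
      rw [hstep, ih ht]
      simp [pvBody, pvPd, hne]

-- Lemma 3: split₀.go without the accumulator, on space/solid chars
theorem go_eq_goSpec (k : List Char) (hk : ∀ c ∈ k, pvOk c) :
    ∀ cur acc, PySem.Chars.split₀.go k cur acc = acc.reverse ++ pvGoSpec k cur := by
  induction k with
  | nil =>
    intro cur acc
    unfold PySem.Chars.split₀.go pvGoSpec
    split
    · simp_all
    · simp_all
  | cons c t ih =>
    intro cur acc
    have ht : ∀ c ∈ t, pvOk c := fun c hc => hk c (by simp [hc])
    have hsp : PySem.Chars.isspace c = decide (c = ' ') := by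
      rcases hk c (by simp) with rfl | ⟨_, h⟩
      · decide
      · rw [h]
        symm
        simp only [decide_eq_false_iff_not]
        rintro rfl
        exact absurd h (by decide)
    unfold PySem.Chars.split₀.go pvGoSpec
    rw [hsp]
    by_cases hce : c = ' '
    · subst hce
      simp only [decide_true, if_true]
      by_cases hcur : cur.isEmpty
      · simp [hcur, ih ht]
      · simp [hcur, ih ht]
    · simp [hce, ih ht]

theorem goSpec_ne_nil (k : List Char) : ∀ cur, cur ≠ [] → pvGoSpec k cur ≠ [] := by
  induction k with
  | nil => intro cur h; simp [pvGoSpec, List.isEmpty_iff, h]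
  | cons c t ih =>
    intro cur h
    unfold pvGoSpec
    by_cases hce : c = ' '
    · simp [hce, List.isEmpty_iff, h]
    · simp only [hce, if_false]
      exact ih (c :: cur) (by simp)

def pvTrail (k : List Char) : List Char := if pvPd k false then ['-'] else []
def pvTrailT (k : List Char) : List Char := if pvPd k true then ['-'] else []

-- the mutual core: SL1 (nonempty current word) and SL2 (just emitted a dash)
theorem body_join_mutual : ∀ n (k : List Char), k.length ≤ n → (∀ c ∈ k, pvOk c) →
    ((∀ w : List Char, w ≠ [] →
        PySem.Chars.join ['-'] (pvGoSpec k w) ++ pvTrail k = w.reverse ++ pvBody k false) ∧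
     ('-' :: pvBody k true =
        (if pvGoSpec k [] = [] then [] else '-' :: PySem.Chars.join ['-'] (pvGoSpec k [])) ++ pvTrailT k)) := by
  intro n
  induction n with
  | zero =>
    intro k hlen _
    have hk0 : k = [] := List.eq_nil_of_length_eq_zero (Nat.le_zero.mp hlen)
    subst hk0
    constructor
    · intro w hw
      simp [pvGoSpec, pvBody, pvTrail, pvPd, List.isEmpty_iff, hw, PySem.Chars.join, List.intercalate]
    · simp [pvGoSpec, pvBody, pvTrailT, pvPd, PySem.Chars.join, List.intercalate]
  | succ n ih =>
    intro k hlen hk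
    cases k with
    | nil =>
      constructor
      · intro w hw
        simp [pvGoSpec, pvBody, pvTrail, pvPd, List.isEmpty_iff, hw, PySem.Chars.join, List.intercalate]
      · simp [pvGoSpec, pvBody, pvTrailT, pvPd, PySem.Chars.join, List.intercalate]
    | cons c t =>
      have ht : ∀ c ∈ t, pvOk c := fun c hc => hk c (by simp [hc])
      have htl : t.length ≤ n := by
        have := hlen; simp only [List.length_cons] at this; omega
      have iht := ih t htl ht
      by_cases hce : c = ' '
      · subst hce
        constructor
        · -- SL1 space case, uses SL2 on t
          intro w hw
          have hg : pvGoSpec (' ' :: t) w = w.reverse :: pvGoSpec t [] := by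
            simp [pvGoSpec, List.isEmpty_iff, hw]
          have hb : pvBody (' ' :: t) false = '-' :: pvBody t true := by simp [pvBody]
          have htr : pvTrail (' ' :: t) = pvTrailT t := by simp [pvTrail, pvTrailT, pvPd]
          rw [hg, hb, htr]
          have h2 := iht.2
          by_cases hge : pvGoSpec t [] = []
          · rw [hge]
            simp only [hge, List.nil_append, reduceIte] at h2
            rw [show PySem.Chars.join ['-'] [w.reverse] = w.reverse by
              simp [PySem.Chars.join, List.intercalate]]
            rw [h2]
          · obtain ⟨p, ps, hps⟩ := List.exists_cons_of_ne_nil hge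
            rw [hps]
            rw [show PySem.Chars.join ['-'] (w.reverse :: p :: ps) =
                w.reverse ++ '-' :: PySem.Chars.join ['-'] (p :: ps) by
              simp [PySem.Chars.join, List.intercalate]]
            rw [hps, if_neg (by simp)] at h2
            have h2' : pvBody t true = PySem.Chars.join ['-'] (p :: ps) ++ pvTrailT t := by
              have := h2
              simp only [List.cons_append, List.cons.injEq, true_and] at this
              exact this
            rw [h2']
            simp
        · -- SL2 space case: cur empty, skip
          have hg : pvGoSpec (' ' :: t) ([] : List Char) = pvGoSpec t [] := by
            simp [pvGoSpec]
          have hb : pvBody (' ' :: t) true = pvBody t true := by simp [pvBody]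
          have htr : pvTrailT (' ' :: t) = pvTrailT t := by simp [pvTrailT, pvPd]
          rw [hg, hb, htr]
          exact iht.2
      · constructor
        · -- SL1 solid case: push c onto cur
          intro w hw
          have hg : pvGoSpec (c :: t) w = pvGoSpec t (c :: w) := by simp [pvGoSpec, hce]
          have hb : pvBody (c :: t) false = c :: pvBody t false := by simp [pvBody, hce]
          have htr : pvTrail (c :: t) = pvTrail t := by simp [pvTrail, pvPd, hce]
          rw [hg, hb, htr, iht.1 (c :: w) (by simp)]
          simp
        · -- SL2 solid case: uses SL1 on t with w = [c]
          have hg : pvGoSpec (c :: t) ([] : List Char) = pvGoSpec t [c] := by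
            simp [pvGoSpec, hce]
          have hb : pvBody (c :: t) true = c :: pvBody t false := by simp [pvBody, hce]
          have hne : pvGoSpec t [c] ≠ [] := goSpec_ne_nil t [c] (by simp)
          have htr : pvTrailT (c :: t) = pvTrail t := by simp [pvTrailT, pvTrail, pvPd, hce]
          rw [hg, hb, htr, if_neg hne]
          have h1 := iht.1 [c] (by simp)
          simp only [List.reverse_singleton, List.singleton_append] at h1
          rw [List.cons_append, ← h1]

-- the decomposition: A's cleaned = (dashes) ++ B's collapsed ++ (dashes)
theorem body_decomp (k : List Char) (hk : ∀ c ∈ k, pvOk c) :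
    ∃ a b : List Char, (∀ c ∈ a, c = '-') ∧ (∀ c ∈ b, c = '-') ∧
      pvBody k false = a ++ PySem.Chars.join ['-'] (pvGoSpec k []) ++ b := by
  cases k with
  | nil =>
    exact ⟨[], [], by simp, by simp,
      by simp [pvBody, pvGoSpec, PySem.Chars.join, List.intercalate]⟩
  | cons c t =>
    have ht : ∀ c ∈ t, pvOk c := fun c hc => hk c (by simp [hc])
    have htm := body_join_mutual t.length t le_rfl ht
    by_cases hce : c = ' '
    · subst hce
      have hb : pvBody (' ' :: t) false = '-' :: pvBody t true := by simp [pvBody]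
      have hg : pvGoSpec (' ' :: t) ([] : List Char) = pvGoSpec t [] := by simp [pvGoSpec]
      have h2 := htm.2
      by_cases hge : pvGoSpec t [] = []
      · refine ⟨'-' :: pvBody t true, [], ?_, by simp, ?_⟩
        · intro x hx
          rw [h2] at hx
          simp only [hge, reduceIte, pvTrailT] at hx
          split at hx <;> simp_all
        · rw [hb, hg, hge]
          simp [PySem.Chars.join, List.intercalate]
      · refine ⟨['-'], pvTrailT t, by simp, ?_, ?_⟩
        · intro x hx; simp only [pvTrailT] at hx; split at hx <;> simp_all
        · rw [hb, hg, h2, if_neg hge]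
          simp
    · have hb : pvBody (c :: t) false = c :: pvBody t false := by simp [pvBody, hce]
      have hg : pvGoSpec (c :: t) ([] : List Char) = pvGoSpec t [c] := by simp [pvGoSpec, hce]
      have h1 := htm.1 [c] (by simp)
      simp only [List.reverse_singleton, List.singleton_append] at h1
      refine ⟨[], pvTrail t, by simp, ?_, ?_⟩
      · intro x hx; simp only [pvTrail] at hx; split at hx <;> simp_all
      · rw [hb, hg, List.nil_append, ← h1]

-- stripChars ignores an all-d prefix and an all-d suffix
theorem dropWhile_all_append (p : Char → Bool) (a s : List Char) (ha : ∀ c ∈ a, p c = true) :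
    List.dropWhile p (a ++ s) = List.dropWhile p s := by
  induction a with
  | nil => rfl
  | cons x t ih =>
    simp only [List.cons_append, List.dropWhile_cons, ha x (by simp), if_true]
    exact ih (fun c hc => ha c (by simp [hc]))

theorem stripChars_append_left (a s d : List Char) (ha : ∀ c ∈ a, c ∈ d) :
    PySem.Chars.stripChars (a ++ s) d = PySem.Chars.stripChars s d := by
  show (List.dropWhile (fun c => d.contains c)
          (List.dropWhile (fun c => d.contains c) (a ++ s)).reverse).reverse =
       (List.dropWhile (fun c => d.contains c)
          (List.dropWhile (fun c => d.contains c) s).reverse).reverse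
  rw [dropWhile_all_append _ a s (fun c hc => by simpa using ha c hc)]

theorem stripChars_append_right (s b d : List Char) (hb : ∀ c ∈ b, c ∈ d) :
    PySem.Chars.stripChars (s ++ b) d = PySem.Chars.stripChars s d := by
  show (List.dropWhile (fun c => d.contains c)
          (List.dropWhile (fun c => d.contains c) (s ++ b)).reverse).reverse =
       (List.dropWhile (fun c => d.contains c)
          (List.dropWhile (fun c => d.contains c) s).reverse).reverse
  set p := fun c => d.contains c with hp
  by_cases he : List.dropWhile p s = []
  · have hall := List.dropWhile_eq_nil_iff.mp he
    have h2 : List.dropWhile p (s ++ b) = [] := by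
      rw [List.dropWhile_eq_nil_iff]
      intro c hc
      rcases List.mem_append.mp hc with h | h
      · exact hall c h
      · simpa [hp] using hb c h
    rw [h2, he]
  · have h2 : List.dropWhile p (s ++ b) = List.dropWhile p s ++ b := by
      rw [List.dropWhile_append]
      simp [List.isEmpty_iff, he]
    rw [h2, List.reverse_append,
        dropWhile_all_append p b.reverse _ (fun c hc => by simpa [hp] using hb c (by simpa using hc))]

-- ===== VERDICT (by name: the statement is the Claim_ definition above) =====
theorem normalize_group_prefix_py_spec : Claim_equal_normalize_group_prefix_py := by
  intro gn _
  unfold Spec_normalize_group_prefix_py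
  simp only [normalize_group_prefix_py, normalize_group_prefix_py_alt]
  set raw := PySem.Chars.lower (PySem.Chars.strip gn.toList) with hraw
  set k := raw.filterMap pvKeepB with hkdef
  have hok : ∀ c ∈ k, pvOk c := fun c hc => pvOk_of_mem raw hc
  have hA : raw.foldl pvStepA ([], false) = (pvBody k false, pvPd k false) := by
    rw [foldl_filterMap raw ([], false), ← hkdef, foldl_body k hok]
    simp
  have hB : PySem.Chars.split₀ k = pvGoSpec k [] := by
    show PySem.Chars.split₀.go k [] [] = pvGoSpec k []
    rw [go_eq_goSpec k hok]
    simp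
  obtain ⟨a, b, ha, hb, hdec⟩ := body_decomp k hok
  rw [List.append_assoc] at hdec
  have hstrip : PySem.Chars.stripChars (pvBody k false) ['-', '_'] =
      PySem.Chars.stripChars (PySem.Chars.join ['-'] (pvGoSpec k [])) ['-', '_'] := by
    rw [hdec, stripChars_append_left a _ _ (fun c hc => by simp [ha c hc]),
        stripChars_append_right _ b _ (fun c hc => by simp [hb c hc])]
  rw [hA, hB]
  simp only [hstrip]
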